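-- pv_equiv track=rewrite | github.com/kgpksh/Learning_record | Algorithm/Programmers/Python/Level 2/멀리 뛰기.py | solution
-- ===== SOURCE A (Python) =====
-- def solution(n):
--     if n == 1:
--         return 1
--
--     dpTable = [0] * (n + 1)
--     dpTable[1] = 1
--     dpTable[2] = 2
--
--     for i in range(3, n + 1) :
--         dpTable[i] = (dpTable[i - 2] + dpTable[i - 1]) % 1234567
--
--     return dpTable[n]
-- ===== SOURCE B (Python) =====
-- def solution(n):
--     M = 1234567
--     def fib_pair(k):
--         # (F(k) % M, F(k+1) % M) by fast doubling
--         if k == 0: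
--             return (0, 1)
--         a, b = fib_pair(k // 2)
--         c = a * (2 * b - a) % M
--         d = (a * a + b * b) % M
--         if k % 2 == 0:
--             return (c, d)
--         return (d, (c + d) % M)
--     return fib_pair(n + 1)[0]
-- ===== Notes on version B (the rewrite author's own statement) =====
-- stated objective: faster
-- what changed: Replaces the linear DP table with fast-doubling Fibonacci recursion computing F(n+1) under the problem's modulus in O(log n) multiplications.
-- outside the precondition, e.g. on solution(0): A raises IndexError, B returns 1
import Mathlib
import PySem

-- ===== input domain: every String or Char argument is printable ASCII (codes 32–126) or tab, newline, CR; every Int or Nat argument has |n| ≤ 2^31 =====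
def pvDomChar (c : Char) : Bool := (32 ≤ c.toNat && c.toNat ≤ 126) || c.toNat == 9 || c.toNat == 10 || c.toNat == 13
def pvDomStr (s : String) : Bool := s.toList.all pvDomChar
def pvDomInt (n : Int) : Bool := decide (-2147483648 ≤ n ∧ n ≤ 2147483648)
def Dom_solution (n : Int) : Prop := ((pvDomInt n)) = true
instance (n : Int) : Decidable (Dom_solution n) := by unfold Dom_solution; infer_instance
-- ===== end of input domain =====

-- B replaces A's linear DP table by fast-doubling of the Fibonacci recurrence under the same modulus.

-- ===== PORT A =====
-- the loop body of A's for-loop; the Python list is ported as an Array (O(1) index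
-- assignment, like a Python list); every index the loop touches is nonnegative and
-- in range (i runs over range(3, n+1)), where set/get below are exact.
def stepA (dp : Array Int) (i : Int) : Array Int :=
  dp.setIfInBounds i.toNat
    (PySem.Int.mod (dp.getD (i - 2).toNat 0 + dp.getD (i - 1).toNat 0) 1234567)

def solution (n : Int) : Int :=
  if n = 1 then 1
  else
    let dp0 := Array.replicate (n + 1).toNat (0 : Int)
    let dp1 := dp0.setIfInBounds 1 1
    let dp2 := dp1.setIfInBounds 2 2
    let dp := (PySem.List.pyRange 3 (n + 1) 1).foldl stepA dp2
    dp.getD n.toNat 0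

-- ===== PORT B =====
-- fib_pair of Source B; recursion on the Nat argument (k // 2 is Nat division for the
-- nonnegative k that occur here; exact for every k reached under Pre_).
def fibPair (k : Nat) : Int × Int :=
  if k = 0 then (0, 1)
  else
    let p := fibPair (k / 2)
    let a := p.1
    let b := p.2
    let c := PySem.Int.mod (a * (2 * b - a)) 1234567
    let d := PySem.Int.mod (a * a + b * b) 1234567
    if k % 2 = 0 then (c, d) else (d, PySem.Int.mod (c + d) 1234567)
decreasing_by exact Nat.div_lt_self (Nat.pos_of_ne_zero (by assumption)) (by omega)

def solution_alt (n : Int) : Int := (fibPair (n + 1).toNat).1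

-- ===== PRECONDITION & SPEC =====
-- A raises IndexError for every n ≤ 0 (the dp table has fewer than 3 cells).
def Pre_solution (n : Int) : Prop := 1 ≤ n
instance (n : Int) : Decidable (Pre_solution n) := by unfold Pre_solution; infer_instance
def pvWitness_solution : Int := 5

def Spec_solution (n : Int) (out : Int) : Prop := out = solution_alt n
instance (n : Int) (out : Int) : Decidable (Spec_solution n out) := by unfold Spec_solution; infer_instance

-- ===== CLAIM (what is proved, stated in full; the proofs are below) =====
def Claim_equal_solution : Prop := ∀ (n : Int), Dom_solution n → Pre_solution n → Spec_solution n (solution n)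

-- ===== LEMMAS AND PROOFS =====

-- Fibonacci mod 1234567: the common value both ports compute.
def fibm (k : Nat) : Int := (Nat.fib k : Int) % 1234567

lemma fibm_add_two (k : Nat) : fibm (k + 2) = (fibm k + fibm (k + 1)) % 1234567 := by
  unfold fibm
  rw [Nat.fib_add_two]
  push_cast
  rw [Int.add_emod]

lemma mod_eq (x : Int) : PySem.Int.mod x 1234567 = x % 1234567 :=
  PySem.Int.mod_eq_emod_of_pos (by norm_num)

lemma emod_congr {x y : Int} (h : (x : ZMod 1234567) = (y : ZMod 1234567)) :
    x % 1234567 = y % 1234567 := by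
  have := (ZMod.intCast_eq_intCast_iff' x y 1234567).mp h
  simpa using this

lemma cast_fibm (k : Nat) : ((fibm k : Int) : ZMod 1234567) = (Nat.fib k : ZMod 1234567) := by
  unfold fibm
  rw [show ((1234567 : Int)) = ((1234567 : Nat) : Int) by norm_num, ZMod.intCast_mod]
  push_cast
  rfl

lemma fib_double_cast (j : Nat) :
    (Nat.fib (2 * j) : Int) = (Nat.fib j : Int) * (2 * (Nat.fib (j + 1) : Int) - (Nat.fib j : Int)) := by
  have hle : Nat.fib j ≤ 2 * Nat.fib (j + 1) :=
    le_trans (Nat.fib_le_fib_succ) (by omega)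
  rw [Nat.fib_two_mul, Nat.cast_mul, Nat.cast_sub hle]
  push_cast
  ring

lemma fibPair_eq (k : Nat) : fibPair k = (fibm k, fibm (k + 1)) := by
  induction k using Nat.strong_induction_on with
  | _ k ih =>
    rw [fibPair]
    by_cases hk : k = 0
    · simp [hk, fibm]
    · have hdiv : k / 2 < k := Nat.div_lt_self (Nat.pos_of_ne_zero hk) (by omega)
      simp only [hk, if_false]
      rw [ih (k / 2) hdiv]
      set j := k / 2 with hj
      have hc : PySem.Int.mod (fibm j * (2 * fibm (j + 1) - fibm j)) 1234567 = fibm (2 * j) := by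
        rw [mod_eq, show fibm (2 * j) = (Nat.fib (2 * j) : Int) % 1234567 from rfl,
          fib_double_cast]
        apply emod_congr
        push_cast [cast_fibm]
        ring
      have hd : PySem.Int.mod (fibm j * fibm j + fibm (j + 1) * fibm (j + 1)) 1234567
          = fibm (2 * j + 1) := by
        rw [mod_eq, show fibm (2 * j + 1) = (Nat.fib (2 * j + 1) : Int) % 1234567 from rfl,
          Nat.fib_two_mul_add_one]
        apply emod_congr
        push_cast [cast_fibm]
        ring
      have hcd : PySem.Int.mod (fibm (2 * j) + fibm (2 * j + 1)) 1234567 = fibm (2 * j + 2) := by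
        rw [mod_eq]
        exact (fibm_add_two (2 * j)).symm
      by_cases hpar : k % 2 = 0
      · have h2j : 2 * j = k := by omega
        simp only [hpar, if_true]
        simp only [hc, hd, h2j]
      · have h2j : 2 * j + 1 = k := by omega
        simp only [hpar, if_false]
        simp only [hc, hd, hcd]
        rw [h2j]
        have : 2 * j + 2 = k + 1 := by omega
        rw [this]

-- list-level mirror of stepA, used only by the proofs
def stepL (dp : List Int) (i : Int) : List Int :=
  PySem.List.pySetD dp i
    (PySem.Int.mod (PySem.List.pyGetD dp (i - 2) 0 + PySem.List.pyGetD dp (i - 1) 0) 1234567)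

lemma getD_toList (a : Array Int) (i : Nat) (d : Int) : a.toList.getD i d = a.getD i d := by
  simp [List.getD_eq_getElem?_getD, Array.getD_eq_getD_getElem?, Array.getElem?_toList]

lemma step_bridge (dp : Array Int) (i : Int) (h : 2 ≤ i) :
    (stepA dp i).toList = stepL dp.toList i := by
  unfold stepA stepL
  rw [PySem.List.pySetD_of_nonneg _ _ (by omega : (0:Int) ≤ i)]
  rw [Array.toList_setIfInBounds]
  unfold PySem.List.pyGetD
  rw [PySem.List.pyGet?_of_nonneg _ (by omega : (0:Int) ≤ i - 2),
      PySem.List.pyGet?_of_nonneg _ (by omega : (0:Int) ≤ i - 1),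
      ← getD_toList dp (i - 2).toNat 0, ← getD_toList dp (i - 1).toNat 0]
  simp [List.getD_eq_getElem?_getD]

lemma foldl_bridge (l : List Int) (dp : Array Int) (hl : ∀ i ∈ l, 2 ≤ i) :
    ((l.foldl stepA dp)).toList = l.foldl stepL dp.toList := by
  induction l generalizing dp with
  | nil => rfl
  | cons x xs ih =>
    simp only [List.foldl_cons]
    rw [ih _ (fun i hi => hl i (List.mem_cons_of_mem _ hi)), step_bridge dp x (hl x List.mem_cons_self)]

-- initial dp table of A for size parameter N = n.toNat
def initA (N : Nat) : List Int :=
  PySem.List.pySetD (PySem.List.pySetD (List.replicate (N + 1) (0 : Int)) 1 1) 2 2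

lemma initA_eq (N : Nat) :
    initA N = ((List.replicate (N + 1) (0 : Int)).set 1 1).set 2 2 := by
  unfold initA
  rw [PySem.List.pySetD_of_nonneg _ _ (by norm_num), PySem.List.pySetD_of_nonneg _ _ (by norm_num)]
  rfl

lemma loopA (N : Nat) (hN : 2 ≤ N) (m : Nat) (h2 : 2 ≤ m) (hm : m ≤ N) :
    ((PySem.List.pyRange 3 ((m : Int) + 1) 1).foldl stepL (initA N)).length = N + 1 ∧
    ∀ j : Nat, 1 ≤ j → j ≤ m →
      ((PySem.List.pyRange 3 ((m : Int) + 1) 1).foldl stepL (initA N)).getD j 0 = fibm (j + 1) := by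
  induction m, h2 using Nat.le_induction with
  | base =>
    rw [show ((2 : Nat) : Int) + 1 = 3 by norm_num, PySem.List.pyRange_one_eq_nil (by omega)]
    rw [initA_eq N]
    constructor
    · simp
    · intro j h1 hj
      have e1 : (1 : Nat) < N + 1 := by omega
      have e2 : (2 : Nat) < N + 1 := by omega
      interval_cases j
      · simp [List.getD_eq_getElem?_getD, e1]
        decide
      · simp [List.getD_eq_getElem?_getD, e2]
        decide
  | succ m h2 ih =>
    have hmN : m ≤ N := by omega
    obtain ⟨ihl, ihv⟩ := ih hmN
    have hsplit : PySem.List.pyRange 3 (((m + 1 : Nat) : Int) + 1) 1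
        = PySem.List.pyRange 3 ((m : Int) + 1) 1 ++ [(m : Int) + 1] := by
      push_cast
      rw [show ((m : Int) + 1 + 1) = ((m : Int) + 1) + 1 by ring]
      exact PySem.List.pyRange_one_succ_right (by omega)
    rw [hsplit, List.foldl_append]
    set dp := (PySem.List.pyRange 3 ((m : Int) + 1) 1).foldl stepL (initA N) with hdp
    simp only [List.foldl_cons, List.foldl_nil]
    have hi2 : (m : Int) + 1 - 2 = ((m - 1 : Nat) : Int) := by push_cast [Nat.cast_sub (by omega : 1 ≤ m)]; ring
    have hi1 : (m : Int) + 1 - 1 = ((m : Nat) : Int) := by ring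
    have hset : stepL dp ((m : Int) + 1)
        = dp.set (m + 1) ((dp.getD (m - 1) 0 + dp.getD m 0) % 1234567) := by
      unfold stepL
      rw [hi2, hi1, PySem.List.pySetD_of_nonneg _ _ (by omega : (0 : Int) ≤ (m : Int) + 1),
        show ((m : Int) + 1).toNat = m + 1 by omega]
      simp [PySem.List.pyGetD_natCast, List.getD_eq_getElem?_getD]
    rw [hset]
    have hv1 : dp.getD (m - 1) 0 = fibm m := by
      have := ihv (m - 1) (by omega) (by omega)
      rwa [show m - 1 + 1 = m by omega] at this
    have hv2 : dp.getD m 0 = fibm (m + 1) := ihv m (by omega) (by omega)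
    rw [hv1, hv2, ← fibm_add_two]
    constructor
    · simp [ihl]
    · intro j h1 hj
      rcases Nat.lt_or_ge j (m + 1) with hlt | hge
      · rw [List.getD_eq_getElem?_getD, List.getElem?_set_ne (by omega),
          ← List.getD_eq_getElem?_getD]
        exact ihv j h1 (by omega)
      · have hjeq : j = m + 1 := by omega
        subst hjeq
        have hlen : m + 1 < dp.length := by rw [ihl]; omega
        rw [List.getD_eq_getElem?_getD, List.getElem?_set_self hlen]
        simp [show m + 1 + 1 = m + 2 by ring]


-- ===== VERDICT (by name: the statement is the Claim_ definition above) =====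
theorem solution_spec : Claim_equal_solution := by
  intro n _ hpre
  unfold Spec_solution solution solution_alt Pre_solution at *
  by_cases h1 : n = 1
  · subst h1
    rw [show ((1 : Int) + 1).toNat = 2 by decide, fibPair_eq]
    decide
  · have h2 : 2 ≤ n := by omega
    set N := n.toNat with hNdef
    have hn : n = (N : Int) := by omega
    have hN : 2 ≤ N := by omega
    simp only [if_neg h1]
    have hfold : ((PySem.List.pyRange 3 (n + 1) 1).foldl stepA
        (((Array.replicate (n + 1).toNat (0 : Int)).setIfInBounds 1 1).setIfInBounds 2 2)).toList
        = (PySem.List.pyRange 3 ((N : Int) + 1) 1).foldl stepL (initA N) := by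
      rw [foldl_bridge _ _ (fun i hi => by
        have := (PySem.List.mem_pyRange_one).mp hi
        omega)]
      rw [hn]
      congr 1
      unfold initA
      rw [show ((N : Int) + 1).toNat = N + 1 by omega,
        PySem.List.pySetD_of_nonneg _ _ (by norm_num), PySem.List.pySetD_of_nonneg _ _ (by norm_num)]
      simp [Array.toList_setIfInBounds, Array.toList_replicate]
    obtain ⟨hl, hv⟩ := loopA N hN N hN le_rfl
    rw [← getD_toList, hfold]
    rw [hv N (by omega) le_rfl, show (n + 1).toNat = N + 1 by omega, fibPair_eq]
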